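-- pv_equiv track=rewrite | github.com/thedestroyer4312/pec-reborn | src/problem_42.py | is_triangle_word
-- ===== SOURCE A (Python) =====
-- triangle_sequence_nums_cache = [1]
--
-- def triangle_sequence(n: int) -> int:
--     # Note: closed form for the sum of the first n natural numbers
--
--     return (n * (n + 1)) // 2
--
-- def is_triangle_word(word: str) -> bool:
--     val: int = 0
--     for char in word:
--         val += ord(char) - ord('A') + 1
--
--     # Now, check if val is in the triangle sequence
--     result: bool = False
--
--     # If the value is greater than what is in the cache, we need to populate the cache
--     if val > triangle_sequence_nums_cache[len(triangle_sequence_nums_cache) - 1]: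
--         # Populate until it exceeds val
--         i: int = len(triangle_sequence_nums_cache)
--
--         while (curr_num := triangle_sequence(i)) <= val:
--             triangle_sequence_nums_cache.append(curr_num)
--             i += 1
--
--     result = val in triangle_sequence_nums_cache
--     return result
-- ===== SOURCE B (Python) =====
-- def is_triangle_word(word: str) -> bool:
--     # Binary search for the triangle index instead of growing a linear cache.
--     val = sum(ord(c) - 64 for c in word)
--     if val < 1:
--         return False
--     lo, hi = 1, val  # T(n) >= n, so any solution n lies in [1, val]
--     while lo < hi:
--         mid = (lo + hi) // 2
--         if mid * (mid + 1) // 2 < val: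
--             lo = mid + 1
--         else:
--             hi = mid
--     return lo * (lo + 1) // 2 == val
-- ===== Notes on version B (the rewrite author's own statement) =====
-- stated objective: alternative
-- what changed: Replaces A's linearly grown cache of all triangle numbers up to the letter sum v (O(sqrt v) loop iterations plus a linear membership scan) by a binary search for the triangle index n with T(n) >= v in [1, v]; the letter sum itself still dominates on long words, so no measured speed-up is claimed.
import Mathlib
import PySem

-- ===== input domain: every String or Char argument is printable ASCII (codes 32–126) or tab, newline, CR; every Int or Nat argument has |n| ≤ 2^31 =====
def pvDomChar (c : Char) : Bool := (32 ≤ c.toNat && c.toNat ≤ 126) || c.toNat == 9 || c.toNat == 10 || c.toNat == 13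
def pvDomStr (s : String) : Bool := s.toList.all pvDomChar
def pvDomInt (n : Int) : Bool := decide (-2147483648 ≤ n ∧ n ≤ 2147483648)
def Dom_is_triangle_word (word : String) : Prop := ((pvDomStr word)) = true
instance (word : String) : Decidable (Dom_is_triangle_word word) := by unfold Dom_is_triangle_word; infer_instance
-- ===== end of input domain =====

-- B replaces A's linearly grown cache of triangle numbers by a binary search for the
-- triangle index (objective: alternative — fewer loop steps after the letter sum, which
-- itself dominates, so no speed-up is claimed).
-- A mutates a module-level cache in Python; the equivalence proved here is about the
-- return value only (which does not depend on the cache's prior state).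

-- ===== PORT A =====

-- triangle_sequence(n)
def pvTriA (n : Int) : Int := PySem.Int.floordiv (n * (n + 1)) 2

-- needed by the port's termination proof (cited in decreasing_by)
theorem pvTriA_cast (i : Nat) : pvTriA (i : Int) = ((i * (i + 1) / 2 : Nat) : Int) := by
  unfold pvTriA
  have : ((i : Int) * ((i : Int) + 1)) = ((i * (i + 1) : Nat) : Int) := by push_cast; ring
  rw [this]
  exact_mod_cast PySem.Int.floordiv_natCast (i * (i + 1)) 2

theorem pvTri_ge_self (n : Nat) : n ≤ n * (n + 1) / 2 := by
  rcases Nat.eq_zero_or_pos n with h | h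
  · simp [h]
  · rw [Nat.le_div_iff_mul_le (by norm_num)]
    exact Nat.mul_le_mul_left n (by omega)

-- the while loop populating triangle_sequence_nums_cache (fresh cache = [1], i = len = 1)
def pvCacheLoop (val : Int) (i : Nat) (cache : List Int) : List Int :=
  if pvTriA (i : Int) ≤ val then pvCacheLoop val (i + 1) (cache ++ [pvTriA (i : Int)]) else cache
termination_by (val + 1 - (i : Int)).toNat
decreasing_by
  rename_i h
  rw [pvTriA_cast] at h
  have := pvTri_ge_self i
  omega

def is_triangle_word (word : String) : Bool :=
  let val : Int := word.toList.foldl (fun v c => v + ((c.toNat : Int) - 65 + 1)) 0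
  let cache : List Int := [1]
  -- cache[len(cache)-1] on the nonempty fresh cache: pyGet? is some, .getD 0 never fires
  let cache' :=
    if (PySem.List.pyGet? cache ((cache.length : Int) - 1)).getD 0 < val then
      pvCacheLoop val cache.length cache
    else cache
  cache'.contains val

-- ===== PORT B =====

-- the binary-search while loop of Source B
def pvBSearch (val : Int) (lo hi : Nat) : Nat :=
  if lo < hi then
    let mid := (lo + hi) / 2
    if ((mid * (mid + 1) / 2 : Nat) : Int) < val then pvBSearch val (mid + 1) hi
    else pvBSearch val lo mid
  else lo
termination_by hi - lo
decreasing_by all_goals omega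

def is_triangle_word_alt (word : String) : Bool :=
  let val : Int := (word.toList.map (fun c => (c.toNat : Int) - 64)).sum
  if val < 1 then false
  else
    let lo := pvBSearch val 1 val.toNat
    ((lo * (lo + 1) / 2 : Nat) : Int) == val

-- ===== PRECONDITION & SPEC =====
def Spec_is_triangle_word (word : String) (out : Bool) : Prop := out = is_triangle_word_alt word
instance (word : String) (out : Bool) : Decidable (Spec_is_triangle_word word out) := by unfold Spec_is_triangle_word; infer_instance

-- ===== CLAIM (what is proved, stated in full; the proofs are below) =====
def Claim_equal_is_triangle_word : Prop := ∀ (word : String), Dom_is_triangle_word word → Spec_is_triangle_word word (is_triangle_word word)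

-- ===== LEMMAS AND PROOFS =====

def triN (n : Nat) : Nat := n * (n + 1) / 2

theorem triN_mono {n m : Nat} (h : n ≤ m) : triN n ≤ triN m :=
  Nat.div_le_div_right (Nat.mul_le_mul h (by omega))

theorem le_triN (n : Nat) : n ≤ triN n := pvTri_ge_self n

theorem pvTriA_eq_triN (i : Nat) : pvTriA (i : Int) = ((triN i : Nat) : Int) := pvTriA_cast i

theorem mem_pvCacheLoop (val : Int) (i : Nat) (cache : List Int) :
    val ∈ pvCacheLoop val i cache ↔ val ∈ cache ∨ ∃ n, i ≤ n ∧ ((triN n : Nat) : Int) = val := by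
  fun_induction pvCacheLoop val i cache with
  | case1 i cache hcond ih =>
    rw [ih]
    simp only [List.mem_append, List.mem_singleton, pvTriA_eq_triN]
    constructor
    · rintro ((hc | he) | ⟨n, hn, he⟩)
      · exact Or.inl hc
      · exact Or.inr ⟨i, le_refl _, he.symm⟩
      · exact Or.inr ⟨n, by omega, he⟩
    · rintro (hc | ⟨n, hn, he⟩)
      · exact Or.inl (Or.inl hc)
      · rcases Nat.eq_or_lt_of_le hn with rfl | hlt
        · exact Or.inl (Or.inr he.symm)
        · exact Or.inr ⟨n, by omega, he⟩
  | case2 i cache hcond =>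
    rw [pvTriA_eq_triN] at hcond
    push Not at hcond
    constructor
    · exact Or.inl
    · rintro (hc | ⟨n, hn, he⟩)
      · exact hc
      · exfalso
        have : triN i ≤ triN n := triN_mono hn
        omega

theorem A_iff (val : Int) :
    (let cache : List Int := [1]
     let cache' :=
       if (PySem.List.pyGet? cache ((cache.length : Int) - 1)).getD 0 < val then
         pvCacheLoop val cache.length cache
       else cache
     cache'.contains val) = true ↔ ∃ n, 1 ≤ n ∧ ((triN n : Nat) : Int) = val := by
  have htri1 : triN 1 = 1 := by norm_num [triN]
  simp only [PySem.List.pyGet?, PySem.List.pyIdx?]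
  norm_num
  split_ifs with h
  · rw [mem_pvCacheLoop]
    constructor
    · rintro (h1 | ⟨n, hn, he⟩)
      · simp at h1; omega
      · exact ⟨n, hn, he⟩
    · rintro ⟨n, hn, he⟩
      exact Or.inr ⟨n, hn, he⟩
  · simp only [List.mem_singleton]
    constructor
    · rintro rfl
      exact ⟨1, le_refl _, by simp [htri1]⟩
    · rintro ⟨n, hn, he⟩
      have h1 : (1 : Nat) ≤ triN n := le_trans hn (le_triN n)
      omega

theorem pvBSearch_spec (val : Int) :
    ∀ (k lo hi : Nat), hi - lo ≤ k → lo ≤ hi →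
      (∀ n, n < lo → ((triN n : Nat) : Int) < val) → val ≤ ((triN hi : Nat) : Int) →
      lo ≤ pvBSearch val lo hi ∧ pvBSearch val lo hi ≤ hi ∧
      (∀ n, n < pvBSearch val lo hi → ((triN n : Nat) : Int) < val) ∧
      val ≤ ((triN (pvBSearch val lo hi) : Nat) : Int) := by
  intro k
  induction k with
  | zero =>
    intro lo hi hk hle hlow hhi
    have : lo = hi := by omega
    subst this
    rw [pvBSearch, if_neg (by omega)]
    exact ⟨le_refl _, le_refl _, hlow, hhi⟩
  | succ k ih =>
    intro lo hi hk hle hlow hhi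
    rw [pvBSearch]
    by_cases hlt : lo < hi
    · rw [if_pos hlt]
      have hmid1 : lo ≤ (lo + hi) / 2 := by omega
      have hmid2 : (lo + hi) / 2 < hi := by omega
      by_cases hc : (((lo + hi) / 2 * ((lo + hi) / 2 + 1) / 2 : Nat) : Int) < val
      · rw [if_pos hc]
        have hlow' : ∀ n, n < (lo + hi) / 2 + 1 → ((triN n : Nat) : Int) < val := by
          intro n hn
          have : triN n ≤ triN ((lo + hi) / 2) := triN_mono (by omega)
          have hc' : ((triN ((lo + hi) / 2) : Nat) : Int) < val := hc
          omega
        obtain ⟨r1, r2, r3, r4⟩ := ih ((lo + hi) / 2 + 1) hi (by omega) (by omega) hlow' hhi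
        exact ⟨le_trans (by omega) r1, r2, r3, r4⟩
      · rw [if_neg hc]
        push Not at hc
        have := ih lo ((lo + hi) / 2) (by omega) (by omega) hlow hc
        exact ⟨this.1, le_trans this.2.1 (by omega), this.2.2⟩
    · have : lo = hi := by omega
      subst this
      rw [if_neg hlt]
      exact ⟨le_refl _, le_refl _, hlow, hhi⟩

theorem B_iff (val : Int) :
    (if val < 1 then false
     else
       let lo := pvBSearch val 1 val.toNat
       (((lo * (lo + 1) / 2 : Nat) : Int) == val)) = true ↔
    ∃ n, 1 ≤ n ∧ ((triN n : Nat) : Int) = val := by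
  split_ifs with h
  · simp only [false_iff]
    rintro ⟨n, hn, he⟩
    have h1 : (1 : Nat) ≤ triN n := le_trans hn (le_triN n)
    omega
  · push Not at h
    have hhi : val ≤ ((triN val.toNat : Nat) : Int) := by
      have := le_triN val.toNat
      omega
    have hlow : ∀ n, n < 1 → ((triN n : Nat) : Int) < val := by
      intro n hn
      have : n = 0 := by omega
      subst this
      simp only [triN]
      omega
    obtain ⟨h1, h2, h3, h4⟩ :=
      pvBSearch_spec val (val.toNat - 1) 1 val.toNat (by omega) (by omega) hlow hhi
    set r := pvBSearch val 1 val.toNat with hr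
    show (((triN r : Nat) : Int) == val) = true ↔ _
    rw [beq_iff_eq]
    constructor
    · intro he
      exact ⟨r, h1, he⟩
    · rintro ⟨n, hn, he⟩
      have hrn : r ≤ n := by
        by_contra hc
        push Not at hc
        have := h3 n hc
        omega
      have : triN r ≤ triN n := triN_mono hrn
      omega

theorem val_eq (l : List Char) (a : Int) :
    l.foldl (fun v c => v + ((c.toNat : Int) - 65 + 1)) a
      = a + (l.map (fun c => (c.toNat : Int) - 64)).sum := by
  induction l generalizing a with
  | nil => simp
  | cons c l ih => simp [List.foldl_cons, ih]; ring

-- ===== VERDICT (by name: the statement is the Claim_ definition above) =====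
theorem is_triangle_word_spec : Claim_equal_is_triangle_word := by
  intro word _
  unfold Spec_is_triangle_word is_triangle_word is_triangle_word_alt
  rw [Bool.eq_iff_iff]
  rw [show (word.toList.foldl (fun v c => v + ((c.toNat : Int) - 65 + 1)) 0)
        = (word.toList.map (fun c => (c.toNat : Int) - 64)).sum from by rw [val_eq]; ring]
  exact (A_iff _).trans (B_iff _).symm
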